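-- pv_equiv track=rewrite | github.com/siva-bathula/Brilliant | AlternateSolutionsInPython/AdventOfCode/2016/Day18.py | solve
-- ===== SOURCE A (Python) =====
-- def tile_state(left, center, right):
--     if left != right:
--         return '^'
--     return '.'
--
-- def solve(data, height=40):
--     row = list(data)
--     safe = data.count('.')
--
--     for _ in range(1, height):
--         new_row = []
--         for l, c, r in zip(['.'] + row[:-1], row, row[1:] + ['.']):
--             new_row.append(tile_state(l, c, r))
--         safe += new_row.count('.')
--
--         row = new_row
--
--     return safe
-- ===== SOURCE B (Python) =====
-- def _next(row):
--     padded = '.' + row + '.'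
--     return ''.join('^' if padded[i - 1] != padded[i + 1] else '.'
--                    for i in range(1, len(row) + 1))
--
-- def solve(data, height=40):
--     # Memoized cycle detection: because each row determines the next, the first
--     # repeated row starts a cycle; the remaining rows' safe counts are then
--     # summed in closed form instead of being simulated one by one.
--     counts = [data.count('.')]
--     seen = {data: 0}
--     row = data
--     target = height if height > 1 else 1
--     g = 0
--     while g + 1 < target:
--         row = _next(row)
--         g += 1
--         s = seen.get(row)
--         if s is not None:
--             p = g - s
--             cycle = counts[s:g]
--             remaining = target - g
--             full, extra = divmod(remaining, p)
--             return sum(counts) + full * sum(cycle) + sum(cycle[:extra])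
--         seen[row] = g
--         counts.append(row.count('.'))
--     return sum(counts)
-- ===== Notes on version B (the rewrite author's own statement) =====
-- stated objective: alternative
-- what changed: B replaces A's unconditional row-by-row simulation of all height generations by memoized cycle detection: every row seen is stored in a dict with its generation and its safe count in a list, and at the first repeated row the total for all remaining generations is computed in closed form with divmod over the cycle's count sum instead of being simulated.
import Mathlib
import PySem

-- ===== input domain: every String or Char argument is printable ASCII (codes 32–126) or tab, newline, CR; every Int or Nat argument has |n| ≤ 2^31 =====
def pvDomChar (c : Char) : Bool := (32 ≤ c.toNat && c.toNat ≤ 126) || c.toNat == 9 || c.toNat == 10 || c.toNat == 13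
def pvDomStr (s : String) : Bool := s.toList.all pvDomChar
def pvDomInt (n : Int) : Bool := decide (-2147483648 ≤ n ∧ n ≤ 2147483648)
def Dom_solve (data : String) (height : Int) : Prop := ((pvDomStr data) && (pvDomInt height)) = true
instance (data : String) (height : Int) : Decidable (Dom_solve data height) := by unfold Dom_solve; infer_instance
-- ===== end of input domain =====

-- B replaces A's row-by-row simulation of all `height` generations by memoized cycle
-- detection: each row seen is recorded with its generation in a dict and its safe count in a
-- list; at the first repeated row the remaining generations' total is obtained in closed form
-- (divmod over the cycle) instead of being simulated. Return values agree on all inputs.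

-- ===== PORT A =====
def tileState (l _c r : Char) : Char := if l ≠ r then '^' else '.'
def stepRow (row : List Char) : List Char :=
  ((('.' :: PySem.List.slice row none (some (-1))).zip row).zip
      (PySem.List.slice row (some 1) none ++ ['.'])).foldl
    (fun acc p => acc ++ [tileState p.1.1 p.1.2 p.2]) []

def solve (data : String) (height : Int) : Int :=
  let row := data.toList
  let safe : Int := (PySem.Str.count data "." : Int)
  let st := (PySem.List.pyRange 1 height 1).foldl
    (fun (st : List Char × Int) _ =>
      let new_row := stepRow st.1
      (new_row, st.2 + (PySem.List.count new_row '.' : Int)))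
    (row, safe)
  st.2

-- ===== PORT B =====
-- B's helper _next: next row read off the '.'-padded current row
def nextRow (row : List Char) : List Char :=
  let padded := '.' :: row ++ ['.']
  (PySem.List.pyRange 1 ((row.length : Int) + 1) 1).map
    (fun i => if PySem.List.pyGetD padded (i - 1) '.' ≠ PySem.List.pyGetD padded (i + 1) '.'
              then '^' else '.')

-- B's while loop; the fuel is the number of iterations the condition g+1 < target still allows
def bLoop (target : Int) : Nat → List Char → Int → PySem.Dict (List Char) Int → List Int → Int
  | 0, _, _, _, counts => counts.sum
  | fuel + 1, row, g, seen, counts =>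
      let row' := nextRow row
      let g' := g + 1
      match seen.get? row' with
      | some s =>
          let p := g' - s
          let cycle := PySem.List.slice counts (some s) (some g')
          let remaining := target - g'
          let full := PySem.Int.floordiv remaining p
          let extra := PySem.Int.mod remaining p
          counts.sum + full * cycle.sum + (PySem.List.slice cycle none (some extra)).sum
      | none =>
          bLoop target fuel row' g' (seen.insert row' g')
            (counts ++ [(PySem.List.count row' '.' : Int)])

def solve_alt (data : String) (height : Int) : Int :=
  let counts : List Int := [(PySem.Str.count data "." : Int)]
  let seen : PySem.Dict (List Char) Int := PySem.Dict.ofList [(data.toList, 0)]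
  let target := if height > 1 then height else 1
  bLoop target (target - 1).toNat data.toList 0 seen counts

-- ===== PRECONDITION & SPEC =====
def Spec_solve (data : String) (height : Int) (out : Int) : Prop := out = solve_alt data height
instance (data : String) (height : Int) (out : Int) : Decidable (Spec_solve data height out) := by unfold Spec_solve; infer_instance

-- ===== CLAIM (what is proved, stated in full; the proofs are below) =====
def Claim_equal_solve : Prop := ∀ (data : String) (height : Int), Dom_solve data height → Spec_solve data height (solve data height)

-- ===== LEMMAS AND PROOFS =====
-- safe count of generation i, and the sum of the first n generations' counts
def genCount (r0 : List Char) (i : Nat) : Int := ((stepRow^[i] r0).count '.' : Int)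
def genSum (r0 : List Char) (n : Nat) : Int := ((List.range n).map (genCount r0)).sum

-- counting a single-character substring is counting the character
theorem count_go_single (c : Char) :
    ∀ (l : List Char) (fuel acc : Nat), l.length ≤ fuel →
      PySem.Chars.count.go [c] fuel l acc = acc + l.count c := by
  intro l
  induction l with
  | nil => intro fuel acc _; cases fuel <;> simp [PySem.Chars.count.go]
  | cons h t ih =>
    intro fuel acc hf
    cases fuel with
    | zero => simp at hf
    | succ f =>
      rw [PySem.Chars.count.go]
      by_cases hc : h = c
      · subst hc
        simp only [List.isPrefixOf, Bool.and_true, beq_self_eq_true, if_pos]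
        simp only [List.length_singleton, List.drop_succ_cons, List.drop_zero]
        rw [ih f (acc + 1) (by simpa using hf)]
        simp
        omega
      · have hpf : ([c].isPrefixOf (h :: t)) = false := by
          simp [List.isPrefixOf]
          exact fun he => absurd he.symm hc
        rw [hpf]
        simp only [Bool.false_eq_true, if_false]
        rw [ih f acc (by simpa using hf)]
        simp [hc]

theorem count_single (cs : List Char) (c : Char) :
    PySem.Chars.count cs [c] = cs.count c := by
  rw [PySem.Chars.count]
  simp [count_go_single c cs cs.length 0 le_rfl]

-- the two neighbours of cell i (Python '.'-padding at both edges)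
def nbrL (row : List Char) (i : Nat) : Char := if i = 0 then '.' else row.getD (i - 1) '.'
def nbrR (row : List Char) (i : Nat) : Char := row.getD (i + 1) '.'

theorem stepRow_eq_map (row : List Char) :
    stepRow row = (List.range row.length).map
      (fun i => if nbrL row i ≠ nbrR row i then '^' else '.') := by
  unfold stepRow
  rw [PySem.List.foldl_append_singleton_eq_map, PySem.List.slice_to_neg_one,
    PySem.List.slice_from_one, List.nil_append]
  cases row with
  | nil => simp
  | cons a t =>
    apply List.ext_getElem
    · simp [List.length_zip]; try omega
    · intro i h1 h2
      simp only [List.getElem_map, List.getElem_zip, List.getElem_range, tileState]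
      have hn : (a :: t).length = t.length + 1 := by simp
      have hL : ('.' :: (a :: t).dropLast)[i]'(by simp_all; try omega) = nbrL (a :: t) i := by
        cases i with
        | zero => simp [nbrL]
        | succ k =>
          simp only [List.getElem_cons_succ, nbrL]
          rw [List.getElem_dropLast]
          have hk : k < (a :: t).length := by simp_all [List.length_zip]; try omega
          simp [List.getD_eq_getElem?_getD, List.getElem?_eq_getElem hk]
      have hR : ((a :: t).tail ++ ['.'])[i]'(by simp_all; try omega) = nbrR (a :: t) i := by
        rw [List.getElem_append]
        simp only [List.tail_cons, nbrR]
        split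
        · next h =>
          have : i + 1 < (a :: t).length := by simpa using Nat.succ_lt_succ h
          simp [List.getD_eq_getElem?_getD, List.getElem?_eq_getElem this]
        · next h =>
          have hi : i + 1 ≥ (a :: t).length := by simp at h ⊢; omega
          simp [List.getD_eq_getElem?_getD, List.getElem?_eq_none_iff.mpr (by simpa using hi)]
      rw [hL, hR]

theorem nextRow_eq_stepRow (row : List Char) : nextRow row = stepRow row := by
  rw [stepRow_eq_map]
  unfold nextRow
  rw [PySem.List.pyRange_one]
  have h1 : ((row.length : Int) + 1 - 1).toNat = row.length := by omega
  rw [h1, List.map_map]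
  apply List.map_congr_left
  intro k hk
  rw [List.mem_range] at hk
  simp only [Function.comp]
  have e1 : (1 : Int) + (k : Int) - 1 = ((k : Nat) : Int) := by omega
  have e2 : (1 : Int) + (k : Int) + 1 = (((k + 2 : Nat)) : Int) := by omega
  rw [e1, e2, PySem.List.pyGetD_natCast, PySem.List.pyGetD_natCast]
  have hL : ('.' :: row ++ ['.']).getD k '.' = nbrL row k := by
    cases k with
    | zero => simp [nbrL]
    | succ j =>
      simp only [List.cons_append, List.getD_cons_succ, nbrL, Nat.succ_ne_zero, if_false,
        Nat.add_sub_cancel]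
      have hj : j < row.length := by omega
      rw [List.getD_append _ _ _ _ hj]
  have hR : ('.' :: row ++ ['.']).getD (k + 2) '.' = nbrR row k := by
    simp only [List.cons_append, List.getD_cons_succ, nbrR]
    by_cases hj : k + 1 < row.length
    · rw [List.getD_append _ _ _ _ hj]
    · have h2 : row.length ≤ k + 1 := by omega
      rw [List.getD_eq_getElem?_getD, List.getElem?_append_right h2,
        List.getD_eq_getElem?_getD, List.getElem?_eq_none h2]
      have h0 : k + 1 - row.length = 0 := by omega
      simp [h0]
  rw [hL, hR]

-- ===== A side: the fold sums the counts of generations k+1, k+2, … =====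
theorem foldA (r0 : List Char) (L : List Int) :
    ∀ (k : Nat) (acc : Int),
      (L.foldl (fun (st : List Char × Int) _ =>
          (stepRow st.1, st.2 + (PySem.List.count (stepRow st.1) '.' : Int)))
        (stepRow^[k] r0, acc)).2
      = acc + ((List.range L.length).map (fun j => genCount r0 (k + 1 + j))).sum := by
  induction L with
  | nil => intro k acc; simp
  | cons x L ih =>
    intro k acc
    simp only [List.foldl_cons]
    have hs : stepRow (stepRow^[k] r0) = stepRow^[k + 1] r0 :=
      (Function.iterate_succ_apply' stepRow k r0).symm
    rw [hs]
    have := ih (k + 1) (acc + (PySem.List.count (stepRow^[k+1] r0) '.' : Int))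
    rw [this]
    rw [List.length_cons, List.range_succ_eq_map, List.map_cons, List.sum_cons, List.map_map]
    have hmap : (List.range L.length).map ((fun j => genCount r0 (k + 1 + j)) ∘ Nat.succ)
        = (List.range L.length).map (fun j => genCount r0 (k + 1 + 1 + j)) := by
      apply List.map_congr_left
      intro j _
      simp only [Function.comp, Nat.succ_eq_add_one]
      congr 1
      omega
    rw [hmap, PySem.List.count_eq]
    simp only [genCount]
    ring

theorem solve_eq (data : String) (height : Int) :
    solve data height = genSum data.toList (if height > 1 then height else 1).toNat := by
  unfold solve
  have hc : (PySem.Str.count data "." : Int) = genCount data.toList 0 := by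
    have : PySem.Str.count data "." = PySem.Chars.count data.toList ['.'] := by
      simp [pysem]
    rw [this, count_single]
    simp [genCount]
  simp only
  rw [hc]
  have hA := foldA data.toList (PySem.List.pyRange 1 height 1) 0 (genCount data.toList 0)
  rw [Function.iterate_zero_apply] at hA
  rw [hA]
  have hlen : (PySem.List.pyRange 1 height 1).length = (height - 1).toNat :=
    PySem.List.length_pyRange_one 1 height
  rw [hlen]
  set tn := (if height > 1 then height else 1).toNat with htn
  have htn1 : 1 ≤ tn := by
    rw [htn]; split <;> omega
  have hsub : (height - 1).toNat = tn - 1 := by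
    rw [htn]; split <;> omega
  rw [hsub]
  unfold genSum
  have he : tn = (tn - 1) + 1 := by omega
  rw [he, List.range_succ_eq_map, List.map_cons, List.sum_cons, List.map_map]
  congr 1
  apply congrArg List.sum
  apply List.map_congr_left
  intro j _
  simp only [Function.comp, Nat.succ_eq_add_one]
  congr 1
  omega

theorem iterate_period {α : Type} (f : α → α) (x : α) (s p : Nat) (hp : 0 < p)
    (h : f^[s + p] x = f^[s] x) : ∀ k, f^[s + k] x = f^[s + k % p] x := by
  have step : ∀ k, f^[s + k + p] x = f^[s + k] x := by
    intro k
    have e1 : s + k + p = k + (s + p) := by omega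
    have e2 : s + k = k + s := by omega
    rw [e1, Function.iterate_add_apply f k (s + p) x, h, ← Function.iterate_add_apply f k s x, e2]
  intro k
  induction k using Nat.strong_induction_on with
  | _ k ih =>
    by_cases hk : k < p
    · rw [Nat.mod_eq_of_lt hk]
    · have hkp : p ≤ k := by omega
      have e : s + k = s + (k - p) + p := by omega
      rw [e, step, ih (k - p) (by omega), Nat.mod_eq_sub_mod hkp]

theorem per_sum (a : Nat → Int) (p : Nat) (hp : 0 < p) :
    ∀ m, ((List.range m).map (fun j => a (j % p))).sum
      = ((m / p : Nat) : Int) * ((List.range p).map a).sum + ((List.range (m % p)).map a).sum := by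
  intro m
  induction m using Nat.strong_induction_on with
  | _ m ih =>
    by_cases hm : m < p
    · rw [Nat.div_eq_of_lt hm, Nat.mod_eq_of_lt hm]
      simp only [Nat.cast_zero, zero_mul, zero_add]
      congr 1
      apply List.map_congr_left
      intro j hj
      rw [List.mem_range] at hj
      rw [Nat.mod_eq_of_lt (by omega)]
    · have hpm : p ≤ m := by omega
      have e : m = p + (m - p) := by omega
      rw [e, List.range_add, List.map_append, List.sum_append, List.map_map]
      have h1 : ((List.range p).map (fun j => a (j % p))).sum = ((List.range p).map a).sum := by
        congr 1
        apply List.map_congr_left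
        intro j hj
        rw [List.mem_range] at hj
        rw [Nat.mod_eq_of_lt hj]
      have h2 : ((List.range (m - p)).map ((fun j => a (j % p)) ∘ (fun i => p + i))).sum
          = ((List.range (m - p)).map (fun j => a (j % p))).sum := by
        congr 1
        apply List.map_congr_left
        intro j _
        simp only [Function.comp]
        congr 1
        exact Nat.add_mod_left p j
      rw [h1, h2, ih (m - p) (by omega)]
      have hd : (p + (m - p)) / p = (m - p) / p + 1 := by
        rw [← e, Nat.div_eq_sub_div hp hpm]
      have hm2 : (p + (m - p)) % p = (m - p) % p := by
        rw [← e, Nat.mod_eq_sub_mod hpm]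
      rw [hd, hm2]
      push_cast
      ring

-- loop invariant for bLoop
theorem bLoop_eq (r0 : List Char) (target : Int) :
    ∀ (fuel : Nat) (gn : Nat) (seen : PySem.Dict (List Char) Int),
      fuel = (target - 1 - gn).toNat →
      (gn : Int) + 1 ≤ target →
      (∀ p ∈ seen.items, 0 ≤ p.2 ∧ p.2 ≤ (gn : Int) ∧ p.1 = stepRow^[p.2.toNat] r0) →
      bLoop target fuel (stepRow^[gn] r0) (gn : Int) seen
          ((List.range (gn + 1)).map (genCount r0))
        = genSum r0 target.toNat := by
  intro fuel
  induction fuel with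
  | zero =>
    intro gn seen hf hle _
    have ht : target.toNat = gn + 1 := by omega
    simp only [bLoop, genSum, ht]
  | succ m ih =>
    intro gn seen hf hle hinv
    have hgt : (gn : Int) + 2 ≤ target := by omega
    simp only [bLoop]
    rw [nextRow_eq_stepRow, ← Function.iterate_succ_apply' stepRow gn r0]
    cases hget : seen.get? (stepRow^[gn + 1] r0) with
    | none =>
      simp only [Nat.succ_eq_add_one]
      have hrec := ih (gn + 1) (seen.insert (stepRow^[gn + 1] r0) ((gn : Int) + 1))
        (by omega) (by push_cast; omega)
        (by
          intro p hp
          rcases (PySem.Dict.mem_items_insert seen _ _ p).mp hp with h | ⟨h, _⟩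
          · subst h
            refine ⟨by positivity, by push_cast; omega, ?_⟩
            have e : ((gn : Int) + 1).toNat = gn + 1 := by omega
            rw [e]
          · obtain ⟨h1, h2, h3⟩ := hinv p h
            exact ⟨h1, by omega, h3⟩)
      push_cast at hrec
      have hlist : (List.range (gn + 1)).map (genCount r0)
          ++ [(PySem.List.count (stepRow^[gn + 1] r0) '.' : Int)]
          = (List.range (gn + 1 + 1)).map (genCount r0) := by
        conv_rhs => rw [List.range_succ]
        rw [List.map_append, List.map_singleton, PySem.List.count_eq]
        rfl
      rw [hlist]
      exact hrec
    | some s =>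
      simp only
      -- facts about s
      obtain ⟨hs0, hsle, hsrow⟩ := hinv _ (PySem.Dict.mem_items_of_get?_eq_some seen hget)
      simp only at hs0 hsle hsrow
      set sn := s.toNat with hsn
      have hsenat : s = (sn : Int) := by omega
      set pn := gn + 1 - sn with hpn
      have hpn0 : 0 < pn := by omega
      have hsp : sn + pn = gn + 1 := by omega
      -- periodicity
      have hper := iterate_period stepRow r0 sn pn hpn0
        (by rw [hsp]; exact hsrow)
      -- remaining
      set rn := target.toNat - (gn + 1) with hrn
      have hrem : target - ((gn : Int) + 1) = (rn : Int) := by omega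
      have hpcast : (gn : Int) + 1 - s = (pn : Int) := by omega
      have hg' : (gn : Int) + 1 = ((gn + 1 : Nat) : Int) := by push_cast; ring
      -- the counts list and its slice
      have hcounts : (List.range (gn + 1)).map (genCount r0)
          = (List.range sn).map (genCount r0)
            ++ (List.range pn).map (fun j => genCount r0 (sn + j)) := by
        rw [← hsp, List.range_add, List.map_append, List.map_map]
        rfl
      have hcyc : PySem.List.slice ((List.range (gn + 1)).map (genCount r0)) (some s)
            (some ((gn : Int) + 1))
          = (List.range pn).map (fun j => genCount r0 (sn + j)) := by
        rw [hsenat, hg', PySem.List.slice_natCast, hcounts, List.drop_append_of_le_length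
              (by simp), List.drop_of_length_le (by simp)]
        simp only [List.nil_append]
        apply List.take_of_length_le
        simp
        omega
      rw [hcyc, hrem, hpcast]
      have hfull : PySem.Int.floordiv (rn : Int) (pn : Int) = ((rn / pn : Nat) : Int) :=
        PySem.Int.floordiv_natCast rn pn
      have hextra : PySem.Int.mod (rn : Int) (pn : Int) = ((rn % pn : Nat) : Int) :=
        PySem.Int.mod_natCast rn pn
      rw [hfull, hextra]
      have hpart : PySem.List.slice ((List.range pn).map (fun j => genCount r0 (sn + j))) none
            (some ((rn % pn : Nat) : Int))
          = (List.range (rn % pn)).map (fun j => genCount r0 (sn + j)) := by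
        rw [PySem.List.slice_to_natCast, ← List.map_take, List.take_range]
        have hmin : min (rn % pn) pn = rn % pn := by
          have := Nat.mod_lt rn hpn0
          omega
        rw [hmin]
      rw [hpart]
      -- now the pure sum identity
      have htn : target.toNat = (gn + 1) + rn := by omega
      have hsplit : (List.range (gn + 1 + rn)).map (genCount r0)
          = (List.range (gn + 1)).map (genCount r0)
            ++ (List.range rn).map (genCount r0 ∘ (fun i => (gn + 1) + i)) := by
        rw [List.range_add, List.map_append, List.map_map]
      have hshift : (List.range rn).map (genCount r0 ∘ (fun i => (gn + 1) + i))
          = (List.range rn).map (fun j => (fun i => genCount r0 (sn + i)) (j % pn)) := by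
        apply List.map_congr_left
        intro j _
        simp only [Function.comp]
        have e1 : gn + 1 + j = sn + (pn + j) := by omega
        have e2 : (pn + j) % pn = j % pn := Nat.add_mod_left pn j
        simp only [genCount]
        rw [e1, hper (pn + j), e2]
      rw [genSum, htn, hsplit, List.sum_append, hshift,
        per_sum (fun i => genCount r0 (sn + i)) pn hpn0 rn]
      ring

theorem solve_alt_eq (data : String) (height : Int) :
    solve_alt data height = genSum data.toList (if height > 1 then height else 1).toNat := by
  unfold solve_alt
  simp only
  set target := if height > 1 then height else 1 with htarget
  have ht1 : 1 ≤ target := by rw [htarget]; split <;> omega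
  have hc : [(PySem.Str.count data "." : Int)]
      = (List.range (0 + 1)).map (genCount data.toList) := by
    have h1 : PySem.Str.count data "." = PySem.Chars.count data.toList ['.'] := by
      simp [pysem]
    rw [h1]
    simp [count_single, genCount]
  rw [hc]
  have hB := bLoop_eq data.toList target ((target - 1).toNat) 0
    (PySem.Dict.ofList [(data.toList, 0)])
    (by simp)
    (by simp; omega)
    (by
      intro p hp
      have hitems : (PySem.Dict.ofList [(data.toList, (0 : Int))]).items
          = [(data.toList, 0)] := rfl
      rw [hitems] at hp
      simp at hp
      subst hp
      exact ⟨le_rfl, le_rfl, rfl⟩)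
  simpa using hB

-- ===== VERDICT (by name: the statement is the Claim_ definition above) =====
theorem solve_spec : Claim_equal_solve := by
  intro data height _
  unfold Spec_solve
  rw [solve_eq, solve_alt_eq]
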